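-- pv_equiv track=rewrite | github.com/frederikbehr/Language-Identifier-ML-Model | language_families.py | split_into_lists
-- ===== SOURCE A (Python) =====
-- def split_into_lists(text):
--   words = text.split()
--   result = []
--   i = 0
--   while i < len(words):
--     sublist = [words[i]]
--     if i + 1 < len(words):
--       sublist.append(words[i + 1])
--       if i + 2 < len(words):
--         sublist.append(words[i + 2])
--     result.append(" ".join(sublist))
--     i += len(sublist)
--   return result
-- ===== SOURCE B (Python) =====
-- def split_into_lists(text):
--     result = []
--     buf = []
--     for w in text.split():
--         buf.append(w)
--         if len(buf) == 3:
--             result.append(" ".join(buf))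
--             buf = []
--     if buf:
--         result.append(" ".join(buf))
--     return result
-- ===== Notes on version B (the rewrite author's own statement) =====
-- stated objective: simpler
-- what changed: Replaces the index-jumping while loop with nested bounds guards by a single accumulate-and-flush pass: each word is appended to a buffer that is emitted and reset at length 3, with a final flush.
import Mathlib
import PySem

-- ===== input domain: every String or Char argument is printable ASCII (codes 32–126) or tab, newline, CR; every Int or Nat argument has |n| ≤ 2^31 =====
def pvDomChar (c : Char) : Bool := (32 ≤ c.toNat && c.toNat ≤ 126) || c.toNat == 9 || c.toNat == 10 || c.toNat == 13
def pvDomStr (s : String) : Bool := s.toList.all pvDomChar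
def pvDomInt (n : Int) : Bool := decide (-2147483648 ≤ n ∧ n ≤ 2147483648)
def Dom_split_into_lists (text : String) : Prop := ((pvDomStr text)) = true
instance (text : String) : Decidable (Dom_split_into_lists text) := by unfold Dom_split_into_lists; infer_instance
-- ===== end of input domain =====

-- B replaces A's index-jumping while loop by a single accumulate-and-flush pass (simpler decomposition; same cost).


-- ===== PORT A =====
-- A's while loop: each branch appends the join and advances i by the sublist's length.
def splitLoopA (words : List String) (i : Nat) : List String :=
  if _h : i < words.length then
    if i + 1 < words.length then
      if i + 2 < words.length then
        PySem.Str.join " " [words.getD i "", words.getD (i+1) "", words.getD (i+2) ""]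
          :: splitLoopA words (i + 3)
      else
        PySem.Str.join " " [words.getD i "", words.getD (i+1) ""] :: splitLoopA words (i + 2)
    else
      PySem.Str.join " " [words.getD i ""] :: splitLoopA words (i + 1)
  else []
termination_by words.length - i
decreasing_by all_goals omega

def split_into_lists (text : String) : List String :=
  splitLoopA (PySem.Str.split₀ text) 0

-- ===== PORT B =====
def stepB (st : List String × List String) (w : String) : List String × List String :=
  let buf' := st.2 ++ [w]
  if buf'.length == 3 then (st.1 ++ [PySem.Str.join " " buf'], []) else (st.1, buf')

def split_into_lists_alt (text : String) : List String :=
  let st := (PySem.Str.split₀ text).foldl stepB ([], [])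
  if st.2.isEmpty then st.1 else st.1 ++ [PySem.Str.join " " st.2]

-- ===== PRECONDITION & SPEC =====
def Spec_split_into_lists (text : String) (out : List String) : Prop := out = split_into_lists_alt text
instance (text : String) (out : List String) : Decidable (Spec_split_into_lists text out) := by unfold Spec_split_into_lists; infer_instance

-- ===== CLAIM (what is proved, stated in full; the proofs are below) =====
def Claim_equal_split_into_lists : Prop := ∀ (text : String), Dom_split_into_lists text → Spec_split_into_lists text (split_into_lists text)

-- ===== LEMMAS AND PROOFS =====
-- Common characterisation: group a word list into chunks of three.
def chunks : List String → List String
  | [] => []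
  | [a] => [PySem.Str.join " " [a]]
  | [a, b] => [PySem.Str.join " " [a, b]]
  | a :: b :: c :: t => PySem.Str.join " " [a, b, c] :: chunks t

theorem splitLoopA_eq_chunks (n : Nat) (ws : List String) (i : Nat)
    (hn : ws.length - i ≤ n) : splitLoopA ws i = chunks (ws.drop i) := by
  induction n generalizing i with
  | zero =>
    rw [splitLoopA]
    have : ¬ i < ws.length := by omega
    simp [this, List.drop_eq_nil_of_le (by omega : ws.length ≤ i), chunks]
  | succ n ih =>
    rw [splitLoopA]
    by_cases h0 : i < ws.length
    · have hd0 : ws.drop i = ws[i] :: ws.drop (i+1) := List.drop_eq_getElem_cons h0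
      by_cases h1 : i + 1 < ws.length
      · have hd1 : ws.drop (i+1) = ws[i+1] :: ws.drop (i+2) := List.drop_eq_getElem_cons h1
        by_cases h2 : i + 2 < ws.length
        · have hd2 : ws.drop (i+2) = ws[i+2] :: ws.drop (i+3) := List.drop_eq_getElem_cons h2
          simp only [h0, h1, h2, if_pos, dif_pos]
          rw [hd0, hd1, hd2, chunks, ih (i+3) (by omega)]
          simp [List.getD_eq_getElem?_getD, h0, h1, h2]
        · have hd2 : ws.drop (i+2) = [] := List.drop_eq_nil_of_le (by omega)
          simp only [h0, h1, h2, if_pos, if_neg, dif_pos, not_false_iff]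
          rw [hd0, hd1, hd2, chunks, ih (i+2) (by omega), hd2, chunks]
          simp [List.getD_eq_getElem?_getD, h0, h1]
      · have hd1 : ws.drop (i+1) = [] := List.drop_eq_nil_of_le (by omega)
        simp only [h0, h1, if_neg, dif_pos, not_false_iff]
        rw [hd0, hd1, chunks, ih (i+1) (by omega), hd1, chunks]
        simp [List.getD_eq_getElem?_getD, h0]
    · simp [h0, List.drop_eq_nil_of_le (by omega : ws.length ≤ i), chunks]

def flushB (st : List String × List String) : List String :=
  if st.2.isEmpty then st.1 else st.1 ++ [PySem.Str.join " " st.2]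

theorem foldB_eq_chunks (ws : List String) (res buf : List String)
    (hb : buf.length < 3) :
    flushB (ws.foldl stepB (res, buf)) = res ++ chunks (buf ++ ws) := by
  induction ws generalizing res buf with
  | nil =>
    match buf, hb with
    | [], _ => simp [flushB, chunks]
    | [a], _ => simp [flushB, chunks]
    | [a, b], _ => simp [flushB, chunks]
  | cons w ws ih =>
    match buf, hb with
    | [], _ =>
      simp only [List.foldl_cons, stepB]
      rw [ih _ _ (by simp)]
      simp
    | [a], _ =>
      simp only [List.foldl_cons, stepB]
      rw [ih _ _ (by simp)]
      simp
    | [a, b], _ =>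
      simp only [List.foldl_cons, stepB]
      norm_num
      rw [ih _ _ (by simp)]
      simp [chunks]

-- ===== VERDICT (by name: the statement is the Claim_ definition above) =====
theorem split_into_lists_spec : Claim_equal_split_into_lists := by
  intro text _
  unfold Spec_split_into_lists split_into_lists split_into_lists_alt
  rw [splitLoopA_eq_chunks (PySem.Str.split₀ text).length _ 0 (by omega)]
  have := foldB_eq_chunks (PySem.Str.split₀ text) [] [] (by simp)
  simp only [List.nil_append] at this
  simp only [flushB] at this
  simp [← this]
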